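-- pv_equiv track=rewrite | github.com/2025-II-Infra-ADAII/proyecto-i-ada-ii-grupo-l | problema_riego.py | roFB
-- ===== SOURCE A (Python) =====
-- from typing import List, Tuple
-- import itertools
--
-- Tablon = Tuple[int, int, int]  # (ts, tr, p)
--
-- def compute_cost_for_permutation(finca: List[Tablon], perm: List[int]) -> int:
--     """
--     Calcula el costo CRF para una permutación dada.
--     """
--     n = len(finca)
--     t_start = [0] * n
--     tiempo = 0
--     for idx in perm:
--         t_start[idx] = tiempo
--         tiempo += finca[idx][1]  # sumar tiempo de regado
--
--     costo = 0
--     for i in range(n):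
--         ts_i, tr_i, p_i = finca[i]
--         retraso = (t_start[i] + tr_i) - ts_i
--         if retraso > 0:
--             costo += p_i * retraso
--     return costo
--
-- def roFB(finca: List[Tablon]) -> Tuple[List[int], int]:
--     """
--     Fuerza bruta: recibe finca (lista de tuplas (ts, tr, p))
--     Devuelve (pi, costo), donde:
--       - pi: lista con el orden de riego de los tablones
--       - costo: costo total de la solución
--     """
--     n = len(finca)
--     indices = list(range(n))
--     best_perm = []
--     best_cost = float("inf")
--
--     for perm in itertools.permutations(indices):
--         costo = compute_cost_for_permutation(finca, perm)
--         if costo < best_cost: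
--             best_cost = costo
--             best_perm = list(perm)
--
--     return best_perm, best_cost
-- ===== SOURCE B (Python) =====
-- from typing import List, Tuple
--
-- Tablon = Tuple[int, int, int]  # (ts, tr, p)
--
-- def roFB(finca: List[Tablon]) -> Tuple[List[int], int]:
--     """
--     Held-Karp: programacion dinamica descendente memoizada sobre el conjunto
--     (ordenado) de tablones pendientes.  Para un conjunto fijo de tablones ya
--     regados el instante actual t queda determinado, asi que el subproblema
--     solo depende del conjunto pendiente.  Al probar los candidatos en orden
--     creciente y quedarse con el primero estrictamente mejor, reconstruye la
--     permutacion optima lexicograficamente minima (la misma que la fuerza bruta).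
--     """
--     n = len(finca)
--     memo = {}
--
--     def solve(remaining: Tuple[int, ...], t: int) -> Tuple[List[int], int]:
--         if not remaining:
--             return ([], 0)
--         if remaining in memo:
--             return memo[remaining]
--         best_perm = None
--         best_cost = 0
--         for k in range(len(remaining)):
--             j = remaining[k]
--             ts, tr, p = finca[j]
--             delay = t + tr - ts
--             pen = p * delay if delay > 0 else 0
--             sub_perm, sub_cost = solve(remaining[:k] + remaining[k + 1:], t + tr)
--             c = pen + sub_cost
--             if best_perm is None or c < best_cost:
--                 best_perm, best_cost = [j] + sub_perm, c
--         memo[remaining] = (best_perm, best_cost)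
--         return (best_perm, best_cost)
--
--     return solve(tuple(range(n)), 0)
-- ===== Notes on version B (the rewrite author's own statement) =====
-- stated objective: faster
-- what changed: Replaced the O(n!*n) enumeration of all permutations by a memoized Held-Karp dynamic program over subsets of pending jobs (the start time is determined by the set already watered), reconstructing the same lexicographically-smallest optimal permutation by trying candidates in increasing order with a strict improvement test.
import Mathlib
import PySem

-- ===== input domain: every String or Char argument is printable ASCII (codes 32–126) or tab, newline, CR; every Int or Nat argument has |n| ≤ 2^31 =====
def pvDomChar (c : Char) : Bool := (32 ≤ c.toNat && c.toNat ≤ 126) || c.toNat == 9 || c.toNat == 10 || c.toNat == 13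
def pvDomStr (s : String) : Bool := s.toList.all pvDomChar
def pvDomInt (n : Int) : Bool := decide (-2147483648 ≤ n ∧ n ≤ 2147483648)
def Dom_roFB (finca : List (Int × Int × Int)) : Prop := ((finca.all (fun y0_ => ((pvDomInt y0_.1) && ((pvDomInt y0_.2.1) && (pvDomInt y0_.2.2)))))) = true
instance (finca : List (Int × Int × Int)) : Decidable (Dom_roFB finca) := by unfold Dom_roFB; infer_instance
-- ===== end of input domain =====

-- B replaces A's O(n!·n) scan of all permutations by a memoized Held-Karp dynamic program over
-- subsets of pending jobs (O(2^n·n^2)), reconstructing the same lexicographically-smallest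
-- optimal permutation; measured faster at the largest generated sizes.

-- ===== PORT A =====
-- indices fed to this helper always come from permutations of range(len(finca)), so
-- `.toNat` + `getD` are exact here (every idx satisfies 0 ≤ idx < len(finca)).
def computeCostForPermutation (finca : List (Int × Int × Int)) (perm : List Int) : Int :=
  let n := finca.length
  let st := perm.foldl
    (fun (st : List Int × Int) idx =>
      (st.1.set idx.toNat st.2, st.2 + (finca.getD idx.toNat (0, 0, 0)).2.1))
    (List.replicate n (0 : Int), (0 : Int))
  let t_start := st.1
  (List.range n).foldl
    (fun costo i =>
      let f := finca.getD i (0, 0, 0)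
      let retraso := t_start.getD i 0 + f.2.1 - f.1
      if retraso > 0 then costo + f.2.2 * retraso else costo) 0

-- `best_cost = float("inf")` is modelled as `none`; itertools.permutations(range n) is
-- PySem.List.permutations; the permutation list is nonempty, so the final `.getD 0` (for the
-- unreachable `none`) never fires.
def roFB (finca : List (Int × Int × Int)) : List Int × Int :=
  let n := finca.length
  let indices : List Int := (List.range n).map (fun i : Nat => (i : Int))
  let res := (PySem.List.permutations indices n).foldl
    (fun (best : List Int × Option Int) perm =>
      let costo := computeCostForPermutation finca perm
      match best.2 with
      | none => (perm, some costo)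
      | some b => if costo < b then (perm, some costo) else best)
    ([], none)
  (res.1, res.2.getD 0)

-- ===== PORT B =====
-- `solve(remaining, t)` with the dict `memo` threaded through; fuel = len(remaining) at every
-- call (the `0, _ :: _` branch is an unreachable fuel guard).  `remaining` holds indices of
-- finca, always in range, so `.toNat` + `getD` are exact.  `best_perm is None` is the `none`
-- state of the fold accumulator.
def solveGo (finca : List (Int × Int × Int)) :
    Nat → List Int → Int → PySem.Dict (List Int) (List Int × Int) →
      (List Int × Int) × PySem.Dict (List Int) (List Int × Int)
  | _, [], _, memo => (([], 0), memo)
  | 0, _ :: _, _, memo => (([], 0), memo)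
  | fuel + 1, r@(_ :: _), t, memo =>
    match memo.get? r with
    | some v => (v, memo)
    | none =>
      let st := (List.range r.length).foldl
        (fun (st : Option (List Int × Int) × PySem.Dict (List Int) (List Int × Int)) k =>
          let j := r.getD k 0
          let f := finca.getD j.toNat (0, 0, 0)
          let delay := t + f.2.1 - f.1
          let pen := if delay > 0 then f.2.2 * delay else 0
          let sub := solveGo finca fuel (r.eraseIdx k) (t + f.2.1) st.2
          let c := pen + sub.1.2
          (match st.1 with
           | none => some (j :: sub.1.1, c)
           | some b => if c < b.2 then some (j :: sub.1.1, c) else some b, sub.2))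
        (none, memo)
      let v := st.1.getD ([], 0)
      (v, st.2.insert r v)

def roFB_alt (finca : List (Int × Int × Int)) : List Int × Int :=
  let n := finca.length
  (solveGo finca n ((List.range n).map (fun i : Nat => (i : Int))) 0 PySem.Dict.empty).1

-- ===== PRECONDITION & SPEC =====
def Spec_roFB (finca : List (Int × Int × Int)) (out : List Int × Int) : Prop := out = roFB_alt finca
instance (finca : List (Int × Int × Int)) (out : List Int × Int) : Decidable (Spec_roFB finca out) := by unfold Spec_roFB; infer_instance

-- ===== CLAIM (what is proved, stated in full; the proofs are below) =====
def Claim_equal_roFB : Prop := ∀ (finca : List (Int × Int × Int)), Dom_roFB finca → Spec_roFB finca (roFB finca)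

-- ===== LEMMAS AND PROOFS =====

def trOf (finca : List (Int × Int × Int)) (j : Int) : Int := (finca.getD j.toNat (0, 0, 0)).2.1

def penal (finca : List (Int × Int × Int)) (j t : Int) : Int :=
  let f := finca.getD j.toNat (0, 0, 0)
  let delay := t + f.2.1 - f.1
  if delay > 0 then f.2.2 * delay else 0

def incCost (finca : List (Int × Int × Int)) : List Int → Int → Int
  | [], _ => 0
  | j :: p, t => penal finca j t + incCost finca p (t + trOf finca j)

def solveP (finca : List (Int × Int × Int)) : Nat → List Int → Int → List Int × Int
  | _, [], _ => ([], 0)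
  | 0, _ :: _, _ => ([], 0)
  | fuel + 1, r@(_ :: _), t =>
    ((List.range r.length).foldl
      (fun (b : Option (List Int × Int)) k =>
        let j := r.getD k 0
        let sub := solveP finca fuel (r.eraseIdx k) (t + trOf finca j)
        let c := penal finca j t + sub.2
        match b with
        | none => some (j :: sub.1, c)
        | some b' => if c < b'.2 then some (j :: sub.1, c) else some b') none).getD ([], 0)

def updA (finca : List (Int × Int × Int)) (t : Int) (best : List Int × Option Int)
    (perm : List Int) : List Int × Option Int :=
  let costo := incCost finca perm t
  match best.2 with
  | none => (perm, some costo)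
  | some b => if costo < b then (perm, some costo) else best

def sumTr (finca : List (Int × Int × Int)) (l : List Int) : Int := (l.map (trOf finca)).sum

def tval (finca : List (Int × Int × Int)) (r : List Int) : Int :=
  sumTr finca ((List.range finca.length).map (fun i : Nat => (i : Int))) - sumTr finca r

def GoodMemo (finca : List (Int × Int × Int))
    (memo : PySem.Dict (List Int) (List Int × Int)) : Prop :=
  ∀ r v, memo.get? r = some v → v = solveP finca r.length r (tval finca r)

def stt (finca : List (Int × Int × Int)) : List Int → Int → Int → Int
  | [], _, _ => 0
  | j :: p, t, x => if j = x then t else stt finca p (t + trOf finca j) x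

def liftSt (finca : List (Int × Int × Int)) (j t : Int) :
    List Int × Option Int → List Int × Option Int
  | (bp, none) => (j :: bp, none)
  | (bp, some b) => (j :: bp, some (penal finca j t + b))

def enc : Option (List Int × Int) → List Int × Option Int
  | none => ([], none)
  | some (p, c) => (p, some c)

def chunk (m : Nat) (r : List Int) (i : Nat) : List (List Int) :=
  match r[i]? with
  | none => []
  | some x => (PySem.List.permutations (r.eraseIdx i) m).map (fun p => x :: p)

theorem sumTr_eraseIdx (finca : List (Int × Int × Int)) (l : List Int) (k : Nat)
    (hk : k < l.length) :
    sumTr finca l = trOf finca (l.getD k 0) + sumTr finca (l.eraseIdx k) := by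
  induction l generalizing k with
  | nil => simp at hk
  | cons x xs ih =>
    cases k with
    | zero => simp [sumTr]
    | succ k =>
      simp only [List.length_cons, Nat.succ_lt_succ_iff] at hk
      simp only [sumTr, List.getD_cons_succ, List.eraseIdx_cons_succ, List.map_cons, List.sum_cons]
      have := ih k hk
      simp only [sumTr] at this
      omega

theorem solveGo_eq (finca : List (Int × Int × Int)) :
    ∀ fuel (r : List Int) t memo, r.length = fuel → t = tval finca r → GoodMemo finca memo →
      (solveGo finca fuel r t memo).1 = solveP finca fuel r t ∧
        GoodMemo finca (solveGo finca fuel r t memo).2 := by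
  intro fuel
  induction fuel with
  | zero =>
    intro r t memo hlen ht hmm
    rw [List.length_eq_zero_iff] at hlen
    subst hlen
    exact ⟨rfl, hmm⟩
  | succ fuel ih =>
    intro r t memo hlen ht hmm
    obtain ⟨hd, tl, rfl⟩ : ∃ hd tl, r = hd :: tl := by
      cases r with
      | nil => simp at hlen
      | cons a b => exact ⟨a, b, rfl⟩
    set r := hd :: tl with hr
    set stepG := fun (st : Option (List Int × Int) × PySem.Dict (List Int) (List Int × Int)) (k : Nat) =>
          let j := r.getD k 0
          let f := finca.getD j.toNat (0, 0, 0)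
          let delay := t + f.2.1 - f.1
          let pen := if delay > 0 then f.2.2 * delay else 0
          let sub := solveGo finca fuel (r.eraseIdx k) (t + f.2.1) st.2
          let c := pen + sub.1.2
          ((match st.1 with
           | none => some (j :: sub.1.1, c)
           | some b => if c < b.2 then some (j :: sub.1.1, c) else some b), sub.2) with hstepG
    set stepP := fun (b : Option (List Int × Int)) (k : Nat) =>
        let j := r.getD k 0
        let sub := solveP finca fuel (r.eraseIdx k) (t + trOf finca j)
        let c := penal finca j t + sub.2
        match b with
        | none => some (j :: sub.1, c)
        | some b' => if c < b'.2 then some (j :: sub.1, c) else some b' with hstepP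
    have hsolveP : solveP finca (fuel + 1) r t = ((List.range r.length).foldl stepP none).getD ([], 0) := by
      rw [hr, solveP]
    have hsolveG : solveGo finca (fuel + 1) r t memo =
        match memo.get? r with
        | some v => (v, memo)
        | none =>
          let st := (List.range r.length).foldl stepG (none, memo)
          let v := st.1.getD ([], 0)
          (v, st.2.insert r v) := by
      rw [hr, solveGo]
    cases hmem : memo.get? r with
    | some v =>
      rw [hsolveG]
      simp only [hmem]
      have hv := hmm r v hmem
      have hlr : r.length = fuel + 1 := hlen
      rw [hlr] at hv
      rw [← ht] at hv
      exact ⟨hv, hmm⟩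
    | none =>
      have foldlem : ∀ (ks : List Nat), (∀ k ∈ ks, k < r.length) →
          ∀ (b : Option (List Int × Int)) (mm : PySem.Dict (List Int) (List Int × Int)),
            GoodMemo finca mm →
            (ks.foldl stepG (b, mm)).1 = ks.foldl stepP b ∧
              GoodMemo finca (ks.foldl stepG (b, mm)).2 := by
        intro ks
        induction ks with
        | nil => intro _ b mm h; exact ⟨rfl, h⟩
        | cons k ks ihk =>
          intro hmemk b mm h
          rw [List.foldl_cons, List.foldl_cons]
          have hk := hmemk k (by simp)
          have hlen2 : (r.eraseIdx k).length = fuel := by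
            rw [List.length_eraseIdx_of_lt hk]
            omega
          have htv : t + trOf finca (r.getD k 0) = tval finca (r.eraseIdx k) := by
            have hse := sumTr_eraseIdx finca r k hk
            rw [ht]
            unfold tval
            omega
          have hrec := ih (r.eraseIdx k) (t + trOf finca (r.getD k 0)) mm hlen2 htv h
          have hrec1 : (solveGo finca fuel (r.eraseIdx k)
                (t + (finca.getD (r.getD k 0).toNat (0, 0, 0)).2.1) mm).1 =
              solveP finca fuel (r.eraseIdx k)
                (t + (finca.getD (r.getD k 0).toNat (0, 0, 0)).2.1) := hrec.1
          have hGk : stepG (b, mm) k =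
              (stepP b k, (solveGo finca fuel (r.eraseIdx k)
                (t + (finca.getD (r.getD k 0).toNat (0, 0, 0)).2.1) mm).2) := by
            rw [hstepG, hstepP]
            simp only []
            rw [hrec1]
            cases b <;> rfl
          rw [hGk]
          exact ihk (fun x hx => hmemk x (by simp [hx])) (stepP b k) _ hrec.2
      rw [hsolveG]
      simp only [hmem]
      have hfl := foldlem (List.range r.length) (fun k hk => List.mem_range.mp hk) none memo hmm
      constructor
      · show ((List.range r.length).foldl stepG (none, memo)).1.getD ([], 0) = _
        rw [hfl.1, hsolveP]
      · show GoodMemo finca ((((List.range r.length).foldl stepG (none, memo)).2).insert r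
          (((List.range r.length).foldl stepG (none, memo)).1.getD ([], 0)))
        intro r' v' hget'
        rw [PySem.Dict.get?_insert] at hget'
        by_cases hrr : r' = r
        · rw [if_pos hrr] at hget'
          cases hget'
          rw [hrr, hfl.1]
          rw [show r.length = fuel + 1 from hlen, ← ht, hsolveP, ← hlen]
        · rw [if_neg hrr] at hget'
          exact hfl.2 r' v' hget'

theorem perms_ne_nil : ∀ (m : Nat) (r : List Int), r.length = m →
    PySem.List.permutations r m ≠ [] := by
  intro m
  induction m with
  | zero => intro r h; rw [PySem.List.permutations]; simp
  | succ m ih =>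
    intro r h
    rw [PySem.List.permutations]
    cases r with
    | nil => simp at h
    | cons x xs =>
      have : List.range (x :: xs).length = 0 :: ((List.range xs.length).map Nat.succ) := by
        show List.range (xs.length + 1) = _
        rw [List.range_succ_eq_map]
      rw [this, List.flatMap_cons]
      have hx : (x :: xs)[0]? = some x := rfl
      simp only [hx]
      have hne : PySem.List.permutations ((x :: xs).eraseIdx 0) m ≠ [] := by
        apply ih; simpa using h
      intro hcontra
      rcases List.append_eq_nil_iff.mp hcontra with ⟨h1, _⟩
      exact hne (List.map_eq_nil_iff.mp h1)

theorem fold_start_none (finca : List (Int × Int × Int)) (t : Int) :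
    ∀ (L : List (List Int)) (bp : List Int), L ≠ [] →
      L.foldl (updA finca t) (bp, none) = L.foldl (updA finca t) ([], none) := by
  intro L bp h
  cases L with
  | nil => simp at h
  | cons x L => simp [List.foldl_cons, updA]

theorem fold_isSome (finca : List (Int × Int × Int)) (t : Int) :
    ∀ (L : List (List Int)) (s : List Int × Option Int), s.2.isSome →
      (L.foldl (updA finca t) s).2.isSome := by
  intro L
  induction L with
  | nil => intro s h; simpa using h
  | cons x L ih =>
    intro s h
    rw [List.foldl_cons]
    apply ih
    obtain ⟨bp, b⟩ := s
    cases b with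
    | none => simp at h
    | some b => simp only [updA]; split <;> simp

theorem fold_none_some (finca : List (Int × Int × Int)) (t : Int) :
    ∀ (L : List (List Int)), L ≠ [] →
      ∃ mp mc, L.foldl (updA finca t) ([], none) = (mp, some mc) := by
  intro L h
  cases L with
  | nil => simp at h
  | cons x L =>
    rw [List.foldl_cons]
    have h1 : updA finca t ([], none) x = (x, some (incCost finca x t)) := rfl
    rw [h1]
    have := fold_isSome finca t L (x, some (incCost finca x t)) (by simp)
    rcases hres : L.foldl (updA finca t) (x, some (incCost finca x t)) with ⟨mp, ob⟩
    rw [hres] at this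
    cases ob with
    | none => simp at this
    | some mc => exact ⟨mp, mc, rfl⟩

theorem fold_some (finca : List (Int × Int × Int)) (t : Int) :
    ∀ (L : List (List Int)) (mp : List Int) (mc : Int) (bp : List Int) (b : Int),
      L.foldl (updA finca t) ([], none) = (mp, some mc) →
      L.foldl (updA finca t) (bp, some b) =
        if mc < b then (mp, some mc) else (bp, some b) := by
  intro L
  induction L with
  | nil => intro mp mc bp b h; simp at h
  | cons x L ih =>
    intro mp mc bp b h
    rw [List.foldl_cons] at h ⊢
    have hx : updA finca t ([], none) x = (x, some (incCost finca x t)) := rfl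
    rw [hx] at h
    have hbp : updA finca t (bp, some b) x =
        if incCost finca x t < b then (x, some (incCost finca x t)) else (bp, some b) := rfl
    rw [hbp]
    cases L with
    | nil =>
      simp only [List.foldl_nil] at h ⊢
      cases h
      split <;> rfl
    | cons y L' =>
      obtain ⟨mp', mc', h'⟩ := fold_none_some finca t (y :: L') (by simp)
      have hxx := ih mp' mc' x (incCost finca x t) h'
      rw [hxx] at h
      have hbb := ih mp' mc' bp b h'
      by_cases h1 : incCost finca x t < b
      · rw [if_pos h1, hxx]
        by_cases h2 : mc' < incCost finca x t
        · rw [if_pos h2] at h ⊢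
          cases h
          rw [if_pos (by omega)]
        · rw [if_neg h2] at h ⊢
          cases h
          rw [if_pos h1]
      · rw [if_neg h1, hbb]
        by_cases h2 : mc' < incCost finca x t
        · rw [if_pos h2] at h
          cases h
          rfl
        · rw [if_neg h2] at h
          cases h
          rw [if_neg (by omega), if_neg (by omega)]

theorem fold_map_cons (finca : List (Int × Int × Int)) (j t : Int) :
    ∀ (L : List (List Int)) (s : List Int × Option Int),
      (L.map (fun p => j :: p)).foldl (updA finca t) (liftSt finca j t s) =
        liftSt finca j t (L.foldl (updA finca (t + trOf finca j)) s) := by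
  intro L
  induction L with
  | nil => intro s; simp
  | cons p L ih =>
    intro s
    rw [List.map_cons, List.foldl_cons, List.foldl_cons]
    rw [← ih]
    congr 1
    obtain ⟨bp, ob⟩ := s
    cases ob with
    | none => rfl
    | some b =>
      show updA finca t (j :: bp, some (penal finca j t + b)) (j :: p) = _
      simp only [updA, liftSt]
      have hc : incCost finca (j :: p) t = penal finca j t + incCost finca p (t + trOf finca j) := rfl
      rw [hc]
      by_cases h2 : incCost finca p (t + trOf finca j) < b
      · rw [if_pos (by omega), if_pos h2]
      · rw [if_neg (by omega), if_neg h2]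

theorem perms_succ (r : List Int) (m : Nat) :
    PySem.List.permutations r (m + 1) = (List.range r.length).flatMap (chunk m r) := by
  rw [PySem.List.permutations.eq_2]
  apply congrArg (fun F => List.flatMap F (List.range r.length))
  funext i
  cases h : r[i]? <;> simp [chunk, h]

theorem brute_eq (finca : List (Int × Int × Int)) :
    ∀ (m : Nat) (r : List Int) (t : Int), r.length = m →
      (PySem.List.permutations r m).foldl (updA finca t) ([], none) =
        ((solveP finca m r t).1, some (solveP finca m r t).2) := by
  intro m
  induction m with
  | zero =>
    intro r t h
    rw [List.length_eq_zero_iff] at h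
    subst h
    rfl
  | succ m ih =>
    intro r t h
    obtain ⟨hd, tl, rfl⟩ : ∃ hd tl, r = hd :: tl := by
      cases r with
      | nil => simp at h
      | cons a b => exact ⟨a, b, rfl⟩
    set r := hd :: tl with hr
    -- the one-step min-update of B's fold
    set stepP := fun (b : Option (List Int × Int)) (k : Nat) =>
        let j := r.getD k 0
        let sub := solveP finca m (r.eraseIdx k) (t + trOf finca j)
        let c := penal finca j t + sub.2
        match b with
        | none => some (j :: sub.1, c)
        | some b' => if c < b'.2 then some (j :: sub.1, c) else some b' with hstepP
    have hsolve : solveP finca (m + 1) r t = ((List.range r.length).foldl stepP none).getD ([], 0) := by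
      rw [hr, solveP]
    -- inner fold over each mapped block, from an encoded state
    have hstep : ∀ (k : Nat), k < r.length → ∀ ob : Option (List Int × Int),
        (chunk m r k).foldl (updA finca t) (enc ob) = enc (stepP ob k) := by
      intro k hk ob
      have hget : r[k]? = some (r[k]'hk) := List.getElem?_eq_getElem hk
      have hgetD : r.getD k 0 = r[k]'hk := List.getD_eq_getElem r 0 hk
      have hlen : (r.eraseIdx k).length = m := by
        rw [List.length_eraseIdx_of_lt hk]; omega
      have hsub := ih (r.eraseIdx k) (t + trOf finca (r[k]'hk)) hlen
      set sub := solveP finca m (r.eraseIdx k) (t + trOf finca (r[k]'hk)) with hsubdef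
      have hchunk : chunk m r k =
          (PySem.List.permutations (r.eraseIdx k) m).map (fun p => (r[k]'hk) :: p) := by
        unfold chunk
        rw [hget]
      have hne : (PySem.List.permutations (r.eraseIdx k) m).map (fun p => (r[k]'hk) :: p) ≠ [] := by
        intro hcon
        exact perms_ne_nil m _ hlen (List.map_eq_nil_iff.mp hcon)
      have hmapped : List.foldl (updA finca t) ([], none)
            ((PySem.List.permutations (r.eraseIdx k) m).map (fun p => (r[k]'hk) :: p))
          = ((r[k]'hk) :: sub.1, some (penal finca (r[k]'hk) t + sub.2)) := by
        have h1 := fold_map_cons finca (r[k]'hk) t (PySem.List.permutations (r.eraseIdx k) m) ([], none)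
        have h2 : liftSt finca (r[k]'hk) t ([], none) = ([r[k]'hk], none) := rfl
        rw [h2] at h1
        rw [← fold_start_none finca t _ [r[k]'hk] hne, h1, hsub]
        rfl
      show List.foldl (updA finca t) (enc ob) (chunk m r k) = enc (stepP ob k)
      rw [hchunk]
      cases ob with
      | none =>
        rw [show (enc (none : Option (List Int × Int))) = (([] : List Int), (none : Option Int)) from rfl]
        rw [hmapped]
        simp only [hstepP, enc, hgetD]
        rfl
      | some q =>
        obtain ⟨p, b⟩ := q
        have h3 := fold_some finca t _ _ _ p b hmapped
        rw [show enc (some (p, b)) = (p, some b) from rfl, h3]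
        simp only [hstepP, enc, hgetD]
        by_cases hc : penal finca (r[k]'hk) t + sub.2 < b
        · rw [if_pos hc, if_pos hc]
        · rw [if_neg hc, if_neg hc]
    -- outer fold over any index list with in-range members
    have key : ∀ (ks : List Nat), (∀ k ∈ ks, k < r.length) → ∀ ob : Option (List Int × Int),
        ks.foldl (fun s i => (chunk m r i).foldl (updA finca t) s) (enc ob) =
          enc (ks.foldl stepP ob) := by
      intro ks
      induction ks with
      | nil => intro _ ob; rfl
      | cons k ks ihk =>
        intro hmem ob
        rw [List.foldl_cons, List.foldl_cons, hstep k (hmem k (by simp))]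
        exact ihk (fun x hx => hmem x (by simp [hx])) (stepP ob k)
    -- the fold over all indices yields some value
    have hPsome : ∀ (ks : List Nat) (ob : Option (List Int × Int)), ob.isSome →
        (ks.foldl stepP ob).isSome := by
      intro ks
      induction ks with
      | nil => intro ob h; simpa using h
      | cons k ks ihk =>
        intro ob h
        rw [List.foldl_cons]
        apply ihk
        cases ob with
        | none => simp at h
        | some q => simp only [hstepP]; split <;> simp
    have hrange : List.range r.length = 0 :: (List.range tl.length).map Nat.succ := by
      rw [hr]
      show List.range (tl.length + 1) = _
      rw [List.range_succ_eq_map]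
    have hfold : ((List.range r.length).foldl stepP none).isSome := by
      rw [hrange, List.foldl_cons]
      apply hPsome
      simp only [hstepP]; rfl
    obtain ⟨q, hq⟩ := Option.isSome_iff_exists.mp hfold
    rw [perms_succ, List.foldl_flatMap]
    have := key (List.range r.length) (fun k hk => List.mem_range.mp hk) none
    rw [show enc none = (([] : List Int), (none : Option Int)) from rfl] at this
    rw [this, hq, hsolve, hq]
    obtain ⟨p, c⟩ := q
    rfl

theorem arr_final (finca : List (Int × Int × Int)) :
    ∀ (perm : List Int) (arr : List Int) (t : Int), perm.Nodup →
      (∀ j ∈ perm, 0 ≤ j ∧ j.toNat < arr.length) →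
      ∀ i : Nat,
        ((perm.foldl
            (fun (st : List Int × Int) idx =>
              (st.1.set idx.toNat st.2, st.2 + (finca.getD idx.toNat (0, 0, 0)).2.1))
            (arr, t)).1.getD i 0) =
          if ((i : Int) ∈ perm) then stt finca perm t (i : Int) else arr.getD i 0 := by
  intro perm
  induction perm with
  | nil => intro arr t _ _ i; simp
  | cons j p ih =>
    intro arr t h hb i
    rw [List.nodup_cons] at h
    obtain ⟨hj, hp⟩ := h
    obtain ⟨hj0, hjl⟩ := hb j (by simp)
    rw [List.foldl_cons]
    have hb' : ∀ x ∈ p, 0 ≤ x ∧ x.toNat < (arr.set j.toNat t).length := by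
      intro x hx; simpa using hb x (by simp [hx])
    have := ih (arr.set j.toNat t) (t + (finca.getD j.toNat (0,0,0)).2.1) hp hb' i
    rw [this]
    by_cases hip : (i : Int) ∈ p
    · have hji : j ≠ (i : Int) := fun hc => hj (hc ▸ hip)
      rw [if_pos hip, if_pos (by simp [hip]), stt, if_neg hji]
      rfl
    · rw [if_neg hip]
      by_cases hij : (i : Int) = j
      · rw [if_pos (by simp [hij]), stt, if_pos hij.symm]
        have hji : j.toNat = i := by omega
        have hlen : i < (arr.set j.toNat t).length := by rw [List.length_set]; omega
        rw [List.getD_eq_getElem _ _ hlen, List.getElem_set]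
        simp [hji]
      · rw [if_neg (by simp [hij, hip])]
        have hne : j.toNat ≠ i := by omega
        simp [List.getD, List.getElem?_set_ne hne]

theorem incCost_eq_sum (finca : List (Int × Int × Int)) :
    ∀ (perm : List Int) (t : Int), perm.Nodup →
      incCost finca perm t =
        (perm.map (fun j => penal finca j (stt finca perm t j))).sum := by
  intro perm
  induction perm with
  | nil => intro t h; rfl
  | cons j p ih =>
    intro t h
    rw [List.nodup_cons] at h
    obtain ⟨hj, hp⟩ := h
    show penal finca j t + incCost finca p (t + trOf finca j) = _
    rw [List.map_cons, List.sum_cons]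
    have h1 : stt finca (j :: p) t j = t := by simp [stt]
    rw [h1]
    congr 1
    rw [ih (t + trOf finca j) hp]
    congr 1
    apply List.map_congr_left
    intro x hx
    have hne : j ≠ x := fun hc => hj (hc ▸ hx)
    simp [stt, hne]

theorem computeCost_eq_incCost (finca : List (Int × Int × Int)) (perm : List Int)
    (hp : perm.Perm ((List.range finca.length).map (fun i : Nat => (i : Int)))) :
    computeCostForPermutation finca perm = incCost finca perm 0 := by
  have hnodI : ((List.range finca.length).map (fun i : Nat => (i : Int))).Nodup :=
    List.Nodup.map (fun a b h => by exact_mod_cast h) List.nodup_range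
  have hnod : perm.Nodup := hp.nodup_iff.mpr hnodI
  have hbound : ∀ j ∈ perm, 0 ≤ j ∧ j.toNat < (List.replicate finca.length (0 : Int)).length := by
    intro j hj
    have : j ∈ (List.range finca.length).map (fun i : Nat => (i : Int)) := hp.mem_iff.mp hj
    obtain ⟨i, hi, rfl⟩ := List.mem_map.mp this
    rw [List.length_replicate]
    constructor
    · exact Int.natCast_nonneg i
    · rw [Int.toNat_natCast]
      exact List.mem_range.mp hi
  have hmemP : ∀ i : Nat, i < finca.length → ((i : Int) ∈ perm) := by
    intro i hi
    apply hp.mem_iff.mpr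
    exact List.mem_map.mpr ⟨i, List.mem_range.mpr hi, rfl⟩
  show (List.range finca.length).foldl
      (fun costo i =>
        let f := finca.getD i (0, 0, 0)
        let retraso := ((perm.foldl
            (fun (st : List Int × Int) idx =>
              (st.1.set idx.toNat st.2, st.2 + (finca.getD idx.toNat (0, 0, 0)).2.1))
            (List.replicate finca.length (0 : Int), (0 : Int))).1).getD i 0 + f.2.1 - f.1
        if retraso > 0 then costo + f.2.2 * retraso else costo) 0 = incCost finca perm 0
  set tstart := (perm.foldl
      (fun (st : List Int × Int) idx =>
        (st.1.set idx.toNat st.2, st.2 + (finca.getD idx.toNat (0, 0, 0)).2.1))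
      (List.replicate finca.length (0 : Int), (0 : Int))).1 with htstart
  have hfun : (fun (costo : Int) (i : Nat) =>
        let f := finca.getD i (0, 0, 0)
        let retraso := tstart.getD i 0 + f.2.1 - f.1
        if retraso > 0 then costo + f.2.2 * retraso else costo) =
      (fun (costo : Int) (i : Nat) => costo + penal finca (i : Int) (tstart.getD i 0)) := by
    funext costo i
    simp only [penal, Int.toNat_natCast]
    split
    · rfl
    · omega
  rw [hfun, PySem.List.foldl_add, zero_add]
  have hterm : ∀ i ∈ List.range finca.length,
      penal finca (i : Int) (tstart.getD i 0) = penal finca (i : Int) (stt finca perm 0 (i : Int)) := by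
    intro i hi
    have := arr_final finca perm (List.replicate finca.length (0 : Int)) 0 hnod hbound i
    rw [htstart, this, if_pos (hmemP i (List.mem_range.mp hi))]
  rw [List.map_congr_left hterm]
  have hmm : (List.range finca.length).map (fun i : Nat => penal finca (i : Int) (stt finca perm 0 (i : Int))) =
      (((List.range finca.length).map (fun i : Nat => (i : Int))).map (fun j => penal finca j (stt finca perm 0 j))) := by
    rw [List.map_map]
    rfl
  rw [hmm]
  have hps : (perm.map (fun j => penal finca j (stt finca perm 0 j))).Perm
      ((((List.range finca.length).map (fun i : Nat => (i : Int)))).map (fun j => penal finca j (stt finca perm 0 j))) :=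
    hp.map _
  rw [← hps.sum_eq]
  exact (incCost_eq_sum finca perm 0 hnod).symm

theorem roFB_eq_alt (finca : List (Int × Int × Int)) : roFB finca = roFB_alt finca := by
  have hlen : ((List.range finca.length).map (fun i : Nat => (i : Int))).length = finca.length := by
    simp
  set indices := (List.range finca.length).map (fun i : Nat => (i : Int)) with hind
  have hcongr : (PySem.List.permutations indices finca.length).foldl
      (fun (best : List Int × Option Int) perm =>
        let costo := computeCostForPermutation finca perm
        match best.2 with
        | none => (perm, some costo)
        | some b => if costo < b then (perm, some costo) else best)
      ([], none) =
      (PySem.List.permutations indices finca.length).foldl (updA finca 0) ([], none) := by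
    apply PySem.List.foldl_congr_mem
    intro acc x hx
    have hxp : x.Perm indices := by
      apply PySem.List.perm_of_mem_permutations
      rw [hlen]
      exact hx
    have hc := computeCost_eq_incCost finca x hxp
    obtain ⟨bp, ob⟩ := acc
    cases ob with
    | none => simp only [updA, hc]
    | some b => simp only [updA, hc]
  have hbr := brute_eq finca finca.length indices 0 hlen
  have hgood : GoodMemo finca PySem.Dict.empty := by
    intro r v h
    rw [PySem.Dict.get?_empty] at h
    cases h
  have htv : (0 : Int) = tval finca indices := by
    rw [tval, hind]
    omega
  have hgo := solveGo_eq finca finca.length indices 0 PySem.Dict.empty hlen htv hgood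
  have hA : roFB finca =
      (((PySem.List.permutations indices finca.length).foldl
        (fun (best : List Int × Option Int) perm =>
          let costo := computeCostForPermutation finca perm
          match best.2 with
          | none => (perm, some costo)
          | some b => if costo < b then (perm, some costo) else best)
        ([], none)).1,
       (((PySem.List.permutations indices finca.length).foldl
        (fun (best : List Int × Option Int) perm =>
          let costo := computeCostForPermutation finca perm
          match best.2 with
          | none => (perm, some costo)
          | some b => if costo < b then (perm, some costo) else best)
        ([], none)).2).getD 0) := rfl
  have hB : roFB_alt finca = (solveGo finca finca.length indices 0 PySem.Dict.empty).1 := rfl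
  rw [hA, hB, hcongr, hbr, hgo.1]
  rfl

-- ===== VERDICT (by name: the statement is the Claim_ definition above) =====
theorem roFB_spec : Claim_equal_roFB := by
  intro finca _
  unfold Spec_roFB
  exact roFB_eq_alt finca
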